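-- pv_equiv track=rewrite | github.com/chrismmorin-ux/Perspective-Cosmology | verification/sympy/high_prime_fraction_analysis.py | interpret_number
-- ===== SOURCE A (Python) =====
-- products = {
--     1: "R",
--     2: "C",
--     3: "Im_H",
--     4: "H = n_d",
--     6: "C*Im_H",
--     7: "Im_O",
--     8: "O",
--     9: "Im_H^2",
--     11: "n_c",
--     12: "Im_H*n_d or C*Im_H*C",
--     14: "C*Im_O",
--     15: "n_c+n_d or Im_H*n_d+Im_H",
--     16: "C*O or H^2",
--     21: "Im_H*Im_O",
--     22: "C*n_c",
--     24: "Im_H*O",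
--     27: "Im_H^3",
--     28: "n_d*Im_O",
--     32: "n_d*O or C^5",
--     33: "Im_H*n_c",
--     42: "C*Im_H*Im_O (hidden sector)",
--     49: "Im_O^2",
--     56: "Im_O*O",
--     64: "O^2",
--     77: "Im_O*n_c",
--     88: "O*n_c",
--     121: "n_c^2",
-- }
--
-- def interpret_number(n):
--     """Try to interpret a number in terms of framework dimensions"""
--     if n in products:
--         return products[n]
--     # Try simple factorizations
--     for d1 in [1, 2, 3, 4, 7, 8, 11]:
--         if n % d1 == 0:
--             d2 = n // d1
--             if d2 in [1, 2, 3, 4, 7, 8, 11]: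
--                 return f"{d1}*{d2}"
--     return "?"
-- ===== SOURCE B (Python) =====
-- products = {
--     1: "R",
--     2: "C",
--     3: "Im_H",
--     4: "H = n_d",
--     6: "C*Im_H",
--     7: "Im_O",
--     8: "O",
--     9: "Im_H^2",
--     11: "n_c",
--     12: "Im_H*n_d or C*Im_H*C",
--     14: "C*Im_O",
--     15: "n_c+n_d or Im_H*n_d+Im_H",
--     16: "C*O or H^2",
--     21: "Im_H*Im_O",
--     22: "C*n_c",
--     24: "Im_H*O",
--     27: "Im_H^3",
--     28: "n_d*Im_O",
--     32: "n_d*O or C^5",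
--     33: "Im_H*n_c",
--     42: "C*Im_H*Im_O (hidden sector)",
--     49: "Im_O^2",
--     56: "Im_O*O",
--     64: "O^2",
--     77: "Im_O*n_c",
--     88: "O*n_c",
--     121: "n_c^2",
-- }
--
-- # Precomputed table: each product d1*d2 of framework dimensions -> its smallest
-- # first factor d1 (first insertion wins because d1 iterates in ascending order).
-- _FACTOR = {}
-- for _d1 in [1, 2, 3, 4, 7, 8, 11]:
--     for _d2 in [1, 2, 3, 4, 7, 8, 11]:
--         _FACTOR.setdefault(_d1 * _d2, _d1)
--
-- def interpret_number(n):
--     """Try to interpret a number in terms of framework dimensions"""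
--     if n in products:
--         return products[n]
--     d1 = _FACTOR.get(n)
--     if d1 is not None:
--         return f"{d1}*{n // d1}"
--     return "?"
-- ===== Notes on version B (the rewrite author's own statement) =====
-- stated objective: simpler
-- what changed: Replaced A's per-call trial-division loop over allowed divisors by a module-level precomputed dict mapping each product d1*d2 to its smallest factor d1 (setdefault, first insertion wins), so interpret_number is two dict lookups and a formatting step.
import Mathlib
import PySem

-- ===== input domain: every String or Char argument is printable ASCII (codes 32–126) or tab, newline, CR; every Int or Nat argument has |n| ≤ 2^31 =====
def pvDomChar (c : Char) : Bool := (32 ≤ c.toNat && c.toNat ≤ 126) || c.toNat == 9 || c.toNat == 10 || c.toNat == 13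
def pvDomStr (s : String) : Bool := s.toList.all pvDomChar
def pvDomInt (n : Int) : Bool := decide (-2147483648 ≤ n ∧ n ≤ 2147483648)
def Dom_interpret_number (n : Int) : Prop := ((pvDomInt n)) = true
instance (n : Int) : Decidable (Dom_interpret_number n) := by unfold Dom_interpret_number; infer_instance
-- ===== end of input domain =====

-- B replaces A's trial-division loop by a precomputed product→factor table looked up once (objective: simpler).

-- shared data: the module-level `products` dict (used verbatim by both Pythons)
def products : PySem.Dict Int String := PySem.Dict.ofList [
  (1, "R"), (2, "C"), (3, "Im_H"), (4, "H = n_d"), (6, "C*Im_H"), (7, "Im_O"),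
  (8, "O"), (9, "Im_H^2"), (11, "n_c"), (12, "Im_H*n_d or C*Im_H*C"),
  (14, "C*Im_O"), (15, "n_c+n_d or Im_H*n_d+Im_H"), (16, "C*O or H^2"),
  (21, "Im_H*Im_O"), (22, "C*n_c"), (24, "Im_H*O"), (27, "Im_H^3"),
  (28, "n_d*Im_O"), (32, "n_d*O or C^5"), (33, "Im_H*n_c"),
  (42, "C*Im_H*Im_O (hidden sector)"), (49, "Im_O^2"), (56, "Im_O*O"),
  (64, "O^2"), (77, "Im_O*n_c"), (88, "O*n_c"), (121, "n_c^2")]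

-- ===== PORT A =====
-- the `for d1 in [1,2,3,4,7,8,11]: …` loop with its early returns
def interpretLoopA (n : Int) : List Int → String
  | [] => "?"
  | d1 :: rest =>
    if PySem.Int.mod n d1 = 0 then
      let d2 := PySem.Int.floordiv n d1
      if ([1, 2, 3, 4, 7, 8, 11] : List Int).contains d2 then
        PySem.Int.toStr d1 ++ "*" ++ PySem.Int.toStr d2
      else interpretLoopA n rest
    else interpretLoopA n rest

def interpret_number (n : Int) : String :=
  match products.get? n with
  | some s => s
  | none => interpretLoopA n [1, 2, 3, 4, 7, 8, 11]

-- ===== PORT B =====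
-- module-level table: each product d1*d2 → its smallest first factor d1 (setdefault: first insertion wins)
def factorTable : PySem.Dict Int Int :=
  ([1, 2, 3, 4, 7, 8, 11] : List Int).foldl
    (fun t d1 => ([1, 2, 3, 4, 7, 8, 11] : List Int).foldl
      (fun t d2 => t.setdefault (d1 * d2) d1) t)
    PySem.Dict.empty

def interpret_number_alt (n : Int) : String :=
  match products.get? n with
  | some s => s
  | none =>
    match factorTable.get? n with
    | some d1 => PySem.Int.toStr d1 ++ "*" ++ PySem.Int.toStr (PySem.Int.floordiv n d1)
    | none => "?"

-- ===== PRECONDITION & SPEC =====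
def Spec_interpret_number (n : Int) (out : String) : Prop := out = interpret_number_alt n
instance (n : Int) (out : String) : Decidable (Spec_interpret_number n out) := by unfold Spec_interpret_number; infer_instance

-- ===== CLAIM (what is proved, stated in full; the proofs are below) =====
def Claim_equal_interpret_number : Prop := ∀ (n : Int), Dom_interpret_number n → Spec_interpret_number n (interpret_number n)

-- ===== LEMMAS AND PROOFS =====

-- outside 1..121 the products dict has no key n
set_option maxRecDepth 8192 in
lemma products_get?_none (n : Int) (h : n < 1 ∨ 121 < n) : products.get? n = none := by
  have hp : products.keys = [1, 2, 3, 4, 6, 7, 8, 9, 11, 12, 14, 15, 16, 21, 22, 24, 27, 28,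
      32, 33, 42, 49, 56, 64, 77, 88, 121] := by decide
  rw [PySem.Dict.get?_eq_none_iff_not_mem_keys, hp]
  simp only [List.mem_cons, List.not_mem_nil, or_false]
  omega

-- outside 1..121 the factor table has no key n
set_option maxRecDepth 8192 in
lemma factorTable_get?_none (n : Int) (h : n < 1 ∨ 121 < n) : factorTable.get? n = none := by
  have ht : factorTable = PySem.Dict.mk [(1,1), (2,1), (3,1), (4,1), (7,1), (8,1), (11,1),
      (6,2), (14,2), (16,2), (22,2), (9,3), (12,3), (21,3), (24,3), (33,3), (28,4), (32,4),
      (44,4), (49,7), (56,7), (77,7), (64,8), (88,8), (121,11)] := by decide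
  rw [ht, PySem.Dict.get?_eq_none_iff_not_mem_keys, PySem.Dict.keys_mk]
  simp only [List.map_cons, List.map_nil, List.mem_cons, List.not_mem_nil, or_false]
  omega

-- outside 1..121 A's trial-division loop never fires
lemma loopA_q (n : Int) (h : n < 1 ∨ 121 < n) (ds : List Int)
    (hds : ∀ d ∈ ds, 0 < d ∧ d ≤ 11) : interpretLoopA n ds = "?" := by
  induction ds with
  | nil => rfl
  | cons d rest ih =>
    have hd := hds d (List.mem_cons_self ..)
    have hrest : ∀ d ∈ rest, 0 < d ∧ d ≤ 11 := fun x hx => hds x (List.mem_cons_of_mem _ hx)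
    unfold interpretLoopA
    by_cases hm : PySem.Int.mod n d = 0
    · have hc : ¬ (([1, 2, 3, 4, 7, 8, 11] : List Int).contains (PySem.Int.floordiv n d) = true) := by
        simp only [List.contains_eq_mem, decide_eq_true_eq, List.mem_cons, List.not_mem_nil,
          or_false]
        intro hmem
        have hkey := PySem.Int.floordiv_mul_add_mod n d
        rcases hmem with h2 | h2 | h2 | h2 | h2 | h2 | h2 <;> rw [h2] at hkey <;> omega
      rw [if_pos hm, if_neg hc]
      exact ih hrest
    · rw [if_neg hm]
      exact ih hrest

lemma out_of_range_eq (n : Int) (h : n < 1 ∨ 121 < n) :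
    interpret_number n = interpret_number_alt n := by
  unfold interpret_number interpret_number_alt
  rw [products_get?_none n h, factorTable_get?_none n h]
  exact loopA_q n h _ (by decide)

-- ===== VERDICT (by name: the statement is the Claim_ definition above) =====
set_option maxRecDepth 8192 in
theorem interpret_number_spec : Claim_equal_interpret_number := by
  intro n _
  unfold Spec_interpret_number
  by_cases h : 1 ≤ n ∧ n ≤ 121
  · obtain ⟨h1, h2⟩ := h
    interval_cases n <;> decide
  · exact out_of_range_eq n (by omega)
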